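-- pv_equiv track=rewrite | github.com/ajaytani/python | algo/tree/Adjacency.py | bfs
-- ===== SOURCE A (Python) =====
-- def bfs(adj, s):
--     level = {s:0}
--     parent = {s:None}
--     i =1
--     frontier = [s]
--     visited = [(s,None,0)]
--     while frontier:
--         nextlist = []
--         print ('level : ',i)
--         for u in frontier:
--             for v in adj[u]:
--                 if v not in level:
--                     level[v] = i
--                     parent[v] = u
--                     nextlist.append(v)
--                     visited.append((v,u,i))
--         frontier = nextlist
--         i += 1
--     return visited
-- ===== SOURCE B (Python) =====
-- def bfs(adj, s):
--     def go(frontier, seen, i):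
--         if not frontier:
--             return []
--         print('level : ', i)
--         found = []
--         for u in frontier:
--             for v in adj[u]:
--                 if v not in seen:
--                     seen.add(v)
--                     found.append((v, u, i))
--         return found + go([t[0] for t in found], seen, i + 1)
--     return [(s, None, 0)] + go([s], {s}, 1)
-- ===== Notes on version B (the rewrite author's own statement) =====
-- stated objective: simpler
-- what changed: The imperative while-loop with a growing visited accumulator and two bookkeeping dicts (level, parent) is replaced by a pure per-level recursion that returns each level's discovered triples and concatenates them, tracking only a seen-set; parent/level dicts disappear since the returned triples already carry that data.
import Mathlib
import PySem

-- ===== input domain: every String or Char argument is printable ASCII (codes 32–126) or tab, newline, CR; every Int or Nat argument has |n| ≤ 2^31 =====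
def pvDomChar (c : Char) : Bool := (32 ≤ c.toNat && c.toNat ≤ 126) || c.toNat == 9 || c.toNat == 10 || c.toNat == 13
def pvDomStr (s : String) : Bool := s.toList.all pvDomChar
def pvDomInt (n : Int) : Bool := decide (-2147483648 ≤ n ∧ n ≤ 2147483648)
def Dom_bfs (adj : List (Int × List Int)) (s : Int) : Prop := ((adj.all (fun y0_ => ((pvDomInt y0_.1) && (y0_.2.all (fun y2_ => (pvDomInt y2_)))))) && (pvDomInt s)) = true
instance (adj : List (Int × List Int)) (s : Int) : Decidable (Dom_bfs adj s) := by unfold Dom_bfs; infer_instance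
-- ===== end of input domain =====

-- B replaces A's imperative while-loop with a growing visited accumulator and two bookkeeping dicts
-- (level, parent) by a pure per-level recursion that concatenates each level's triples, tracking only
-- a seen-set (objective: simpler). Equivalence is about the RETURN value; both Pythons also print one
-- 'level' line per nonempty frontier (same lines in the same order).

-- ===== PORT A =====
-- adj[u]: first-match association lookup; the [] fallback is Python's KeyError case, excluded by Pre_bfs.
def pvLookup : List (Int × List Int) → Int → List Int
  | [], _ => []
  | (k, vs) :: rest, u => if k == u then vs else pvLookup rest u

-- fuel guard for the while-loop only: #levels ≤ #visited nodes ≤ 1 + total neighbour count, so it always suffices.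
def pvFuel (adj : List (Int × List Int)) : Nat := 2 + adj.foldl (fun a p => a + p.2.length) 0

-- body of A's inner 'for v in adj[u]:' over the state (level, parent, nextlist, visited)
def fA (i u : Int)
    (st : PySem.Dict Int Int × PySem.Dict Int (Option Int) × List Int × List (Int × Option Int × Int))
    (v : Int) :
    PySem.Dict Int Int × PySem.Dict Int (Option Int) × List Int × List (Int × Option Int × Int) :=
  if st.1.contains v then st
  else (st.1.insert v i, st.2.1.insert v (some u), st.2.2.1 ++ [v], st.2.2.2 ++ [(v, some u, i)])

-- A's 'for u in frontier:' body
def stepA (adj : List (Int × List Int)) (i : Int)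
    (st : PySem.Dict Int Int × PySem.Dict Int (Option Int) × List Int × List (Int × Option Int × Int))
    (u : Int) :
    PySem.Dict Int Int × PySem.Dict Int (Option Int) × List Int × List (Int × Option Int × Int) :=
  (pvLookup adj u).foldl (fA i u) st

-- A's 'while frontier:' loop
def bfsLoop (adj : List (Int × List Int)) :
    Nat → PySem.Dict Int Int → PySem.Dict Int (Option Int) → Int → List Int →
    List (Int × Option Int × Int) → List (Int × Option Int × Int)
  | 0, _, _, _, _, visited => visited
  | Nat.succ f, level, parent, i, frontier, visited =>
    if frontier.isEmpty then visited
    else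
      let st := frontier.foldl (stepA adj i) (level, parent, ([] : List Int), visited)
      bfsLoop adj f st.1 st.2.1 (i + 1) st.2.2.1 st.2.2.2

def bfs (adj : List (Int × List Int)) (s : Int) : List (Int × Option Int × Int) :=
  bfsLoop adj (pvFuel adj) (PySem.Dict.empty.insert s 0) (PySem.Dict.empty.insert s (none : Option Int)) 1 [s] [(s, none, 0)]

-- ===== PORT B =====
-- body of B's inner 'for v in adj[u]:' over the state (found, seen)
def fB (i u : Int) (fs : List (Int × Option Int × Int) × PySem.Set Int) (v : Int) :
    List (Int × Option Int × Int) × PySem.Set Int :=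
  if PySem.Set.contains fs.2 v then fs
  else (fs.1 ++ [(v, some u, i)], PySem.Set.add fs.2 v)

-- B's 'for u in frontier:' body
def stepB (adj : List (Int × List Int)) (i : Int)
    (fs : List (Int × Option Int × Int) × PySem.Set Int) (u : Int) :
    List (Int × Option Int × Int) × PySem.Set Int :=
  (pvLookup adj u).foldl (fB i u) fs

-- B's recursive 'go': this level's triples ++ the rest (same fuel guard as A's loop)
def bfsGo (adj : List (Int × List Int)) :
    Nat → List Int → PySem.Set Int → Int → List (Int × Option Int × Int)
  | 0, _, _, _ => []
  | Nat.succ f, frontier, seen, i =>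
    if frontier.isEmpty then []
    else
      let fs := frontier.foldl (stepB adj i) (([] : List (Int × Option Int × Int)), seen)
      fs.1 ++ bfsGo adj f (fs.1.map (·.1)) fs.2 (i + 1)

def bfs_alt (adj : List (Int × List Int)) (s : Int) : List (Int × Option Int × Int) :=
  (s, none, 0) :: bfsGo adj (pvFuel adj) [s] (PySem.Set.ofList [s]) 1

-- ===== PRECONDITION & SPEC =====
-- helpers for Pre_bfs only: the reflexive-transitive closure, inside the input adj, of the edge
-- relation 'p ∈ adj, p.1 = u, v ∈ p.2'; they inspect the input only and are not used by either port.
def pvSucc (adj : List (Int × List Int)) (u : Int) : List Int :=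
  (adj.filter (fun p => p.1 == u)).flatMap (fun p => p.2)
def pvClosureStep (adj : List (Int × List Int)) (seen : PySem.Set Int) : PySem.Set Int :=
  PySem.Set.update seen (seen.flatMap (pvSucc adj))
def pvReach (adj : List (Int × List Int)) (s : Int) : PySem.Set Int :=
  (pvClosureStep adj)^[adj.length + 1] (PySem.Set.ofList [s])

-- Pre_ excludes exactly the inputs on which A raises KeyError (adj[u] for a visited node u that is
-- no key of adj): every node reachable from s along the listed edges must be a key of adj.
def Pre_bfs (adj : List (Int × List Int)) (s : Int) : Prop :=
  ∀ v ∈ pvReach adj s, v ∈ adj.map (·.1)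
instance (adj : List (Int × List Int)) (s : Int) : Decidable (Pre_bfs adj s) := by unfold Pre_bfs; infer_instance

def pvWitness_bfs : (List (Int × List Int)) × Int := ([(0, [1, 2]), (1, [0]), (2, [2])], 0)

def Spec_bfs (adj : List (Int × List Int)) (s : Int) (out : List (Int × Option Int × Int)) : Prop := out = bfs_alt adj s
instance (adj : List (Int × List Int)) (s : Int) (out : List (Int × Option Int × Int)) : Decidable (Spec_bfs adj s out) := by unfold Spec_bfs; infer_instance

-- ===== CLAIM (what is proved, stated in full; the proofs are below) =====
def Claim_equal_bfs : Prop := ∀ (adj : List (Int × List Int)) (s : Int), Dom_bfs adj s → Pre_bfs adj s → Spec_bfs adj s (bfs adj s)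

-- ===== LEMMAS AND PROOFS =====

-- A's inner fold only appends to the nextlist/visited components
theorem fA_factor (i u : Int) (vs : List Int)
    (st : PySem.Dict Int Int × PySem.Dict Int (Option Int) × List Int × List (Int × Option Int × Int)) :
    vs.foldl (fA i u) st =
      ((vs.foldl (fA i u) (st.1, st.2.1, [], [])).1,
       (vs.foldl (fA i u) (st.1, st.2.1, [], [])).2.1,
       st.2.2.1 ++ (vs.foldl (fA i u) (st.1, st.2.1, [], [])).2.2.1,
       st.2.2.2 ++ (vs.foldl (fA i u) (st.1, st.2.1, [], [])).2.2.2) := by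
  induction vs generalizing st with
  | nil => simp
  | cons v vs ih =>
    simp only [List.foldl_cons, fA]
    by_cases h : st.1.contains v
    · simpa [h] using ih st
    · simp only [h, Bool.false_eq_true, if_false]
      rw [ih, ih (st.1.insert v i, st.2.1.insert v (some u), [] ++ [v], [] ++ [(v, some u, i)])]
      simp

-- B's inner fold only appends to the found component
theorem fB_factor (i u : Int) (vs : List Int)
    (fs : List (Int × Option Int × Int) × PySem.Set Int) :
    vs.foldl (fB i u) fs =
      (fs.1 ++ (vs.foldl (fB i u) ([], fs.2)).1, (vs.foldl (fB i u) ([], fs.2)).2) := by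
  induction vs generalizing fs with
  | nil => simp
  | cons v vs ih =>
    simp only [List.foldl_cons, fB]
    by_cases h : PySem.Set.contains fs.2 v
    · have hm : v ∈ fs.2 := by
        rw [PySem.Set.contains_eq_listContains] at h; simpa [List.contains_iff_mem] using h
      simpa [hm] using ih fs
    · simp only [h, Bool.false_eq_true, if_false]
      rw [ih, ih ([] ++ [(v, some u, i)], PySem.Set.add fs.2 v)]
      simp

-- the state relation: the level-dict's keys and the seen-set have the same members
def DRel (lv : PySem.Dict Int Int) (sn : PySem.Set Int) : Prop :=
  ∀ v : Int, lv.contains v = PySem.Set.contains sn v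

theorem rel_insert_add (lv : PySem.Dict Int Int) (sn : PySem.Set Int) (i v : Int)
    (h : DRel lv sn) (hv : lv.contains v = false) :
    DRel (lv.insert v i) (PySem.Set.add sn v) := by
  intro w
  have hvs : v ∉ sn := by
    have hc := h v; rw [hv] at hc
    intro hm
    rw [PySem.Set.contains_eq_listContains] at hc
    simp [List.contains_iff_mem] at hc
    exact hc hm
  rw [PySem.Dict.contains_insert, PySem.Set.add_of_not_mem hvs, h w,
      PySem.Set.contains_eq_listContains, PySem.Set.contains_eq_listContains]
  cases hwv : (w == v)
  · simp [List.contains_append, List.contains_iff_mem, beq_iff_eq] at hwv ⊢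
    simp [hwv]
  · simp [List.contains_append, List.contains_iff_mem, beq_iff_eq] at hwv ⊢
    simp [hwv]

-- per-node correspondence of the two inner folds
theorem inner_rel (i u : Int) (vs : List Int)
    (lv : PySem.Dict Int Int) (pr : PySem.Dict Int (Option Int)) (sn : PySem.Set Int)
    (h : DRel lv sn) :
    DRel (vs.foldl (fA i u) (lv, pr, [], [])).1 (vs.foldl (fB i u) ([], sn)).2 ∧
    (vs.foldl (fA i u) (lv, pr, [], [])).2.2.1 = (vs.foldl (fB i u) ([], sn)).1.map (fun t => t.1) ∧
    (vs.foldl (fA i u) (lv, pr, [], [])).2.2.2 = (vs.foldl (fB i u) ([], sn)).1 := by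
  induction vs generalizing lv pr sn with
  | nil => exact ⟨h, rfl, rfl⟩
  | cons v vs ih =>
    simp only [List.foldl_cons, fA, fB, h v]
    by_cases hc : PySem.Set.contains sn v
    · simp only [hc, if_true]
      exact ih lv pr sn h
    · simp only [hc, Bool.false_eq_true, if_false]
      have hlv : lv.contains v = false := by rw [h v]; simpa using hc
      have h2 := ih (lv.insert v i) (pr.insert v (some u)) (PySem.Set.add sn v)
                    (rel_insert_add lv sn i v h hlv)
      rw [fA_factor, fB_factor]
      exact ⟨h2.1, by simp [h2.2.1], by simp [h2.2.2]⟩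

-- the factor lemmas lifted to the frontier folds
theorem stepA_factor (adj : List (Int × List Int)) (i : Int) (fr : List Int)
    (st : PySem.Dict Int Int × PySem.Dict Int (Option Int) × List Int × List (Int × Option Int × Int)) :
    fr.foldl (stepA adj i) st =
      ((fr.foldl (stepA adj i) (st.1, st.2.1, [], [])).1,
       (fr.foldl (stepA adj i) (st.1, st.2.1, [], [])).2.1,
       st.2.2.1 ++ (fr.foldl (stepA adj i) (st.1, st.2.1, [], [])).2.2.1,
       st.2.2.2 ++ (fr.foldl (stepA adj i) (st.1, st.2.1, [], [])).2.2.2) := by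
  induction fr generalizing st with
  | nil => simp
  | cons u fr ih =>
    simp only [List.foldl_cons, stepA]
    rw [fA_factor, ih, ih (List.foldl (fA i u) (st.1, st.2.1, [], []) (pvLookup adj u))]
    simp

theorem stepB_factor (adj : List (Int × List Int)) (i : Int) (fr : List Int)
    (fs : List (Int × Option Int × Int) × PySem.Set Int) :
    fr.foldl (stepB adj i) fs =
      (fs.1 ++ (fr.foldl (stepB adj i) ([], fs.2)).1, (fr.foldl (stepB adj i) ([], fs.2)).2) := by
  induction fr generalizing fs with
  | nil => simp
  | cons u fr ih =>
    simp only [List.foldl_cons, stepB]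
    rw [fB_factor, ih, ih (List.foldl (fB i u) ([], fs.2) (pvLookup adj u))]
    simp

-- per-level correspondence of the two frontier folds
theorem outer_rel (adj : List (Int × List Int)) (i : Int) (fr : List Int)
    (lv : PySem.Dict Int Int) (pr : PySem.Dict Int (Option Int)) (sn : PySem.Set Int)
    (h : DRel lv sn) :
    DRel (fr.foldl (stepA adj i) (lv, pr, [], [])).1 (fr.foldl (stepB adj i) ([], sn)).2 ∧
    (fr.foldl (stepA adj i) (lv, pr, [], [])).2.2.1 = (fr.foldl (stepB adj i) ([], sn)).1.map (fun t => t.1) ∧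
    (fr.foldl (stepA adj i) (lv, pr, [], [])).2.2.2 = (fr.foldl (stepB adj i) ([], sn)).1 := by
  induction fr generalizing lv pr sn with
  | nil => exact ⟨h, rfl, rfl⟩
  | cons u fr ih =>
    simp only [List.foldl_cons, stepA, stepB]
    obtain ⟨h1, h2, h3⟩ := inner_rel i u (pvLookup adj u) lv pr sn h
    rw [stepA_factor adj i fr, stepB_factor adj i fr]
    have h4 := ih (List.foldl (fA i u) (lv, pr, [], []) (pvLookup adj u)).1
                  (List.foldl (fA i u) (lv, pr, [], []) (pvLookup adj u)).2.1
                  (List.foldl (fB i u) ([], sn) (pvLookup adj u)).2 h1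
    exact ⟨h4.1, by simp [h2, h4.2.1], by simp [h3, h4.2.2]⟩

-- the main simulation: A's loop with accumulator 'vis' equals 'vis ++' B's recursion
theorem main_sim (adj : List (Int × List Int)) (f : Nat) :
    ∀ (lv : PySem.Dict Int Int) (pr : PySem.Dict Int (Option Int)) (sn : PySem.Set Int)
      (i : Int) (fr : List Int) (vis : List (Int × Option Int × Int)),
      DRel lv sn → bfsLoop adj f lv pr i fr vis = vis ++ bfsGo adj f fr sn i := by
  induction f with
  | zero => intro lv pr sn i fr vis _; simp [bfsLoop, bfsGo]
  | succ f ih =>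
    intro lv pr sn i fr vis h
    simp only [bfsLoop, bfsGo]
    by_cases he : fr.isEmpty
    · simp [he]
    · simp only [he, Bool.false_eq_true, if_false]
      obtain ⟨h1, h2, h3⟩ := outer_rel adj i fr lv pr sn h
      rw [stepA_factor]
      simp only [List.nil_append]
      rw [ih _ _ (fr.foldl (stepB adj i) ([], sn)).2 (i + 1) _ _ h1, h2, h3]
      simp

theorem rel_init (s : Int) : DRel (PySem.Dict.empty.insert s 0) (PySem.Set.ofList [s]) := by
  intro v
  rw [PySem.Dict.contains_insert, PySem.Set.contains_eq_listContains]
  simp [PySem.Set.ofList, PySem.Set.add, PySem.Set.contains, PySem.Set.empty, beq_eq_decide]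

-- ===== VERDICT (by name: the statement is the Claim_ definition above) =====
theorem bfs_spec : Claim_equal_bfs := by
  intro adj s _ _
  unfold Spec_bfs bfs bfs_alt
  rw [main_sim adj (pvFuel adj) _ _ (PySem.Set.ofList [s]) 1 [s] _ (rel_init s)]
  simp
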